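-- pv_equiv track=rewrite | github.com/rootveda/sec360 | core/scoreboard/scoreboard_viewer.py | count_unique_detected_flags
-- ===== SOURCE A (Python) =====
-- from typing import List, Dict, Optional, Tuple
--
-- def count_unique_detected_flags(logs: List[Dict]) -> int:
--     """Count detected flags with proper handling of repeated submissions"""
--     seen_field_content_pairs = set()
--     detected_flags_count = 0
--
--     # Process all logs to count all detected flags
--     # Repeated submissions should result in more detected flags
--     for log in logs:
--         content = log.get('content', '')
--         flag_type = log.get('flag_type', 'UNKNOWN')
--         context = log.get('context', '')
--
--         # Only count actual detected flags (not NO_FLAGS)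
--         if content and content.strip() and flag_type != 'NO_FLAGS':
--             # Extract field name from context (e.g., "first_name = John" -> "first_name")
--             field_name = "unknown"
--             if " = " in context:
--                 field_name = context.split(" = ")[0].strip()
--
--             # Create unique identifier for field-content pair
--             field_content_key = f"{field_name}:{content.lower().strip()}"
--
--             # Skip if we've seen this exact field-content pair before
--             if field_content_key in seen_field_content_pairs:
--                 continue
--
--             # Check for partial matches only within the same field context
--             is_duplicate = False
--             normalized_content = content.lower().strip()
--
--             for seen_pair in seen_field_content_pairs:
--                 seen_field, seen_content = seen_pair.split(":", 1)
--                 if (seen_field == field_name and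
--                     (normalized_content in seen_content or seen_content in normalized_content) and
--                     len(normalized_content) > 3):
--                     is_duplicate = True
--                     break
--
--             if not is_duplicate:
--                 seen_field_content_pairs.add(field_content_key)
--                 detected_flags_count += 1
--
--     return detected_flags_count
-- ===== SOURCE B (Python) =====
-- def count_unique_detected_flags(logs):
--     """Count detected flags with proper handling of repeated submissions"""
--     # stage 1: group the normalized contents of the qualifying logs per field, in order
--     groups = {}
--     for log in logs:
--         content = log.get('content', '')
--         if content and content.strip() and log.get('flag_type', 'UNKNOWN') != 'NO_FLAGS':
--             context = log.get('context', '')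
--             field = context.split(" = ")[0].strip() if " = " in context else "unknown"
--             groups[field] = groups.get(field, []) + [content.lower().strip()]
--     # stage 2: fields are independent, so dedup each field's sequence on its own and sum
--     return sum(_field_flag_count(seq) for seq in groups.values())
--
-- def _field_flag_count(seq):
--     """Greedy count of 'new' contents in one field's sequence (exact or partial-substring dedup)."""
--     accepted = []
--     n = 0
--     for nc in seq:
--         if nc in accepted or any((nc in old or old in nc) and len(nc) > 3 for old in accepted):
--             continue
--         accepted.append(nc)
--         n += 1
--     return n
-- ===== Notes on version B (the rewrite author's own statement) =====
-- stated objective: alternative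
-- what changed: Restructures the single streaming pass over a flat set of 'field:content' keys (each inner scan re-splitting every stored key and filtering by field) into two stages: a first pass that only groups the normalized contents of qualifying logs per field, then an independent per-field greedy dedup whose counts are summed; correct because the dedup never compares across fields, so the interleaved order of different fields is irrelevant.
import Mathlib
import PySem

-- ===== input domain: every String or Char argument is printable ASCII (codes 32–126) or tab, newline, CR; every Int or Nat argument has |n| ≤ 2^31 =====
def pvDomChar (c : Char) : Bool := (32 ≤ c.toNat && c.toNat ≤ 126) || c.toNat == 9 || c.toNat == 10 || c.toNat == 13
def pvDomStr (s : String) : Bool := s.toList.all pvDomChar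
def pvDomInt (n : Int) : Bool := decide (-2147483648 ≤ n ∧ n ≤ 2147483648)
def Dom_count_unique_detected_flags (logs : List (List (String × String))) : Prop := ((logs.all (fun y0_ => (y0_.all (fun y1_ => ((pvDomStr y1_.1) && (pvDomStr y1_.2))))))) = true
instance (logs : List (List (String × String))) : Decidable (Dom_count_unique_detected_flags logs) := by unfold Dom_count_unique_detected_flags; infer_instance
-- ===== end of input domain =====

-- B replaces A's single streaming pass over a flat set of "field:content" keys by two stages —
-- group the normalized contents per field, then dedup each field's sequence independently and sum —
-- correct because A's dedup never compares across fields; return values proved equal on Pre_.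

-- shared helper: field_name = context.split(" = ")[0].strip() if " = " in context else "unknown"
-- (Python's split(sep) on any string returns a non-empty list, so the [0] indexing never raises; headD "" is exact)
def pvField (context : String) : String :=
  if PySem.Str.isIn " = " context then
    PySem.Str.strip (((PySem.Str.split? context " = ").getD []).headD "")
  else "unknown"

-- ===== PORT A =====
-- one iteration of A's for-loop; state = (seen_field_content_pairs, detected_flags_count).
-- The inner 'for seen_pair in …: … break' computes a pure existence test over the set, so List.any is exact.
-- split(":", 1) followed by 2-unpacking: the '| _ => false' arm is Python's ValueError arm, unreachable
-- because every stored key contains ':'.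
def pvStepA (st : PySem.Set String × Int) (log : List (String × String)) : PySem.Set String × Int :=
  let d := PySem.Dict.ofList log
  let content := d.getD "content" ""
  let flag_type := d.getD "flag_type" "UNKNOWN"
  let context := d.getD "context" ""
  if content != "" && PySem.Str.strip content != "" && flag_type != "NO_FLAGS" then
    let field_name := pvField context
    let key := field_name ++ ":" ++ PySem.Str.strip (PySem.Str.lower content)
    if PySem.Set.contains st.1 key then st
    else
      let nc := PySem.Str.strip (PySem.Str.lower content)
      let isDup := st.1.any (fun sp =>
        match PySem.Str.splitMax? sp ":" 1 with
        | some [sf, sc] =>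
            sf == field_name && (PySem.Str.isIn nc sc || PySem.Str.isIn sc nc) && decide (3 < PySem.Str.len nc)
        | _ => false)
      if isDup then st else (PySem.Set.add st.1 key, st.2 + 1)
  else st

def count_unique_detected_flags (logs : List (List (String × String))) : Int :=
  (logs.foldl pvStepA (PySem.Set.empty, 0)).2

-- ===== PORT B =====
-- stage 1: one iteration of the grouping loop; groups[field] = groups.get(field, []) + [nc]
def pvGroupStep (g : PySem.Dict String (List String)) (log : List (String × String)) : PySem.Dict String (List String) :=
  let m := PySem.Dict.ofList log
  let content := m.getD "content" ""
  if content != "" && PySem.Str.strip content != "" && m.getD "flag_type" "UNKNOWN" != "NO_FLAGS" then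
    let field := pvField (m.getD "context" "")
    g.insert field (g.getD field [] ++ [PySem.Str.strip (PySem.Str.lower content)])
  else g

-- stage 2: _field_flag_count — greedy dedup of ONE field's sequence; state = (accepted, n)
def pvFieldFlagCount (seq : List String) : Int :=
  (seq.foldl (fun (st : List String × Int) nc =>
      if st.1.contains nc ||
         st.1.any (fun old => (PySem.Str.isIn nc old || PySem.Str.isIn old nc) && decide (3 < PySem.Str.len nc))
      then st else (st.1 ++ [nc], st.2 + 1)) ([], 0)).2

-- sum(_field_flag_count(seq) for seq in groups.values())
def count_unique_detected_flags_alt (logs : List (List (String × String))) : Int :=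
  let groups := logs.foldl pvGroupStep PySem.Dict.empty
  (groups.values.map pvFieldFlagCount).sum

-- ===== PRECONDITION & SPEC =====
-- Pre_ excludes logs whose context yields a field name containing ':' (e.g. context "a:b = v"), on which
-- A still returns: A's flat "field:content" key then splits back at the wrong colon and can collide
-- distinct field/content pairs — an accident of the key encoding as defensible as B's per-field keying.
def Pre_count_unique_detected_flags (logs : List (List (String × String))) : Prop :=
  ∀ log ∈ logs, ':' ∉ (pvField ((PySem.Dict.ofList log).getD "context" "")).toList
instance (logs : List (List (String × String))) : Decidable (Pre_count_unique_detected_flags logs) := by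
  unfold Pre_count_unique_detected_flags; infer_instance

def pvWitness_count_unique_detected_flags : (List (List (String × String))) :=
  [[("content", "John"), ("flag_type", "PII"), ("context", "first_name = John")],
   [("content", "NYC"), ("flag_type", "LOCATION"), ("context", "city = NYC")]]

def Spec_count_unique_detected_flags (logs : List (List (String × String))) (out : Int) : Prop := out = count_unique_detected_flags_alt logs
instance (logs : List (List (String × String))) (out : Int) : Decidable (Spec_count_unique_detected_flags logs out) := by unfold Spec_count_unique_detected_flags; infer_instance

-- ===== CLAIM (what is proved, stated in full; the proofs are below) =====
def Claim_equal_count_unique_detected_flags : Prop := ∀ (logs : List (List (String × String))), Dom_count_unique_detected_flags logs → Pre_count_unique_detected_flags logs → Spec_count_unique_detected_flags logs (count_unique_detected_flags logs)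

-- ===== LEMMAS AND PROOFS =====

-- the three features of a log the loops read
def pvQual (log : List (String × String)) : Bool :=
  (PySem.Dict.ofList log).getD "content" "" != "" &&
  PySem.Str.strip ((PySem.Dict.ofList log).getD "content" "") != "" &&
  (PySem.Dict.ofList log).getD "flag_type" "UNKNOWN" != "NO_FLAGS"
def pvFld (log : List (String × String)) : String :=
  pvField ((PySem.Dict.ofList log).getD "context" "")
def pvNC (log : List (String × String)) : String :=
  PySem.Str.strip (PySem.Str.lower ((PySem.Dict.ofList log).getD "content" ""))

-- reference single pass: A's loop re-expressed on per-field buckets (proof intermediary)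
def pvStepRef (st : PySem.Dict String (List String) × Int) (log : List (String × String)) :
    PySem.Dict String (List String) × Int :=
  let m := PySem.Dict.ofList log
  let content := m.getD "content" ""
  if content != "" && PySem.Str.strip content != "" && m.getD "flag_type" "UNKNOWN" != "NO_FLAGS" then
    let field := pvField (m.getD "context" "")
    let nc := PySem.Str.strip (PySem.Str.lower content)
    let bucket := st.1.getD field []
    if bucket.contains nc then st
    else if bucket.any (fun old => (PySem.Str.isIn nc old || PySem.Str.isIn old nc) && decide (3 < PySem.Str.len nc)) then st
    else (st.1.insert field (bucket ++ [nc]), st.2 + 1)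
  else st

-- pvStepRef on an explicit pair, written with the named features (definitional)
lemma pvStepRef_unfold (d : PySem.Dict String (List String)) (n : Int) (log : List (String × String)) :
    pvStepRef (d, n) log =
      if pvQual log then
        (if (d.getD (pvFld log) []).contains (pvNC log) then (d, n)
         else if (d.getD (pvFld log) []).any (fun old =>
             (PySem.Str.isIn (pvNC log) old || PySem.Str.isIn old (pvNC log)) && decide (3 < PySem.Str.len (pvNC log))) then (d, n)
         else (d.insert (pvFld log) (d.getD (pvFld log) [] ++ [pvNC log]), n + 1))
      else (d, n) := rfl

-- the (field, normalized content) pairs of the qualifying logs, and one field's subsequence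
def pvPairs (logs : List (List (String × String))) : List (String × String) :=
  (logs.filter pvQual).map (fun l => (pvFld l, pvNC l))
def pvProj (f : String) (logs : List (List (String × String))) : List String :=
  ((pvPairs logs).filter (fun p => p.1 == f)).map (fun p => p.2)

-- greedy dedup count, structural form (the loop of pvFieldFlagCount from an arbitrary start)
def pvG : List String → List String → Int
  | [], _ => 0
  | nc :: rest, acc =>
    if acc.contains nc ||
       acc.any (fun old => (PySem.Str.isIn nc old || PySem.Str.isIn old nc) && decide (3 < PySem.Str.len nc))
    then pvG rest acc
    else 1 + pvG rest (acc ++ [nc])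

lemma pvG_nil (acc : List String) : pvG [] acc = 0 := rfl
lemma pvG_cons (nc : String) (rest acc : List String) :
    pvG (nc :: rest) acc =
      if acc.contains nc ||
         acc.any (fun old => (PySem.Str.isIn nc old || PySem.Str.isIn old nc) && decide (3 < PySem.Str.len nc))
      then pvG rest acc
      else 1 + pvG rest (acc ++ [nc]) := rfl

-- splitOnMax.go with maxsplit exhausted returns the rest as one last piece (any fuel)
lemma pv_go_zero (fuel : Nat) (l cur : List Char) (acc : List (List Char)) :
    PySem.Chars.splitOnMax.go [':'] fuel 0 l cur acc = ((cur.reverse ++ l) :: acc).reverse := by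
  cases fuel with
  | zero => simp [PySem.Chars.splitOnMax.go]
  | succ n => cases l <;> simp [PySem.Chars.splitOnMax.go]

-- scanning a colon-free prefix f with maxsplit 1 splits exactly at the first ':'
lemma pv_go_scan (f : List Char) (hf : ':' ∉ f) :
    ∀ (c : List Char) (fuel : Nat) (cur : List Char) (acc : List (List Char)) , f.length + 1 ≤ fuel →
      PySem.Chars.splitOnMax.go [':'] fuel 1 (f ++ ':' :: c) cur acc
        = ((cur.reverse ++ f) :: acc).reverse ++ [c] := by
  induction f with
  | nil =>
      intro c fuel cur acc h
      obtain ⟨n, rfl⟩ : ∃ n, fuel = n + 1 := ⟨fuel - 1, by omega⟩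
      simp [PySem.Chars.splitOnMax.go, List.isPrefixOf, pv_go_zero]
  | cons a f ih =>
      intro c fuel cur acc h
      obtain ⟨n, rfl⟩ : ∃ n, fuel = n + 1 := ⟨fuel - 1, by omega⟩
      have ha : (':' : Char) ≠ a := fun e => hf (by simp [← e])
      have hf' : ':' ∉ f := fun e => hf (by simp [e])
      simp only [List.cons_append, PySem.Chars.splitOnMax.go, List.isPrefixOf]
      rw [if_neg (by simp), if_neg (by simp [ha])]
      rw [ih hf' c n (a :: cur) acc (by simpa using Nat.lt_succ_iff.mp (Nat.lt_of_lt_of_le (Nat.lt_succ_self _) h))]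
      simp
lemma pv_splitkey (f c : String) (hf : ':' ∉ f.toList) :
    PySem.Str.splitMax? (f ++ ":" ++ c) ":" 1 = some [f, c] := by
  unfold PySem.Str.splitMax?
  have hl : (f ++ ":" ++ c).toList = f.toList ++ ':' :: c.toList := by simp
  rw [hl]
  unfold PySem.Chars.splitMax? PySem.Chars.splitOnMax
  rw [if_neg (by decide), if_neg (by decide)]
  rw [show ((1 : Int).toNat) = 1 from rfl]
  rw [show (":".toList) = [':'] from rfl]
  rw [pv_go_scan f.toList hf c.toList _ [] [] (by simp)]
  simp

lemma pv_keyinj {f c f' c' : String} (hf : ':' ∉ f.toList) (hf' : ':' ∉ f'.toList)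
    (h : f ++ ":" ++ c = f' ++ ":" ++ c') : f = f' ∧ c = c' := by
  have h1 := pv_splitkey f c hf
  have h2 := pv_splitkey f' c' hf'
  rw [h, h2] at h1
  simp at h1
  exact ⟨h1.1.symm, h1.2.symm⟩

-- the invariant tying A's flat key set to the reference's per-field buckets
def pvInv (seen : List String) (d : PySem.Dict String (List String)) : Prop :=
  ∀ sp, sp ∈ seen ↔ ∃ f c, ':' ∉ f.toList ∧ c ∈ d.getD f [] ∧ sp = f ++ ":" ++ c

lemma pv_step_eq (seen : PySem.Set String) (d : PySem.Dict String (List String)) (n : Int)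
    (log : List (String × String))
    (hfld : ':' ∉ (pvField ((PySem.Dict.ofList log).getD "context" "")).toList)
    (hinv : pvInv seen d) :
    (pvStepA (seen, n) log).2 = (pvStepRef (d, n) log).2 ∧
      pvInv (pvStepA (seen, n) log).1 (pvStepRef (d, n) log).1 := by
  simp only [pvStepA, pvStepRef]
  generalize hFg : pvField ((PySem.Dict.ofList log).getD "context" "") = field at hfld ⊢
  generalize hNg : PySem.Str.strip (PySem.Str.lower ((PySem.Dict.ofList log).getD "content" "")) = nc
  by_cases hg : (((PySem.Dict.ofList log).getD "content" "" != "" &&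
      PySem.Str.strip ((PySem.Dict.ofList log).getD "content" "") != "" &&
      (PySem.Dict.ofList log).getD "flag_type" "UNKNOWN" != "NO_FLAGS") = true)
  case neg => rw [if_neg hg, if_neg hg]; exact ⟨by simp, hinv⟩
  rw [if_pos hg, if_pos hg]
  -- exact-duplicate tests agree
  have hmem : PySem.Set.contains seen (field ++ ":" ++ nc) = (d.getD field []).contains nc := by
    rw [Bool.eq_iff_iff, PySem.Set.contains_iff, List.contains_iff_mem]
    constructor
    · intro h
      obtain ⟨f, c, hfc, hcd, heq⟩ := (hinv _).mp h
      obtain ⟨hfe, hce⟩ := pv_keyinj hfld hfc heq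
      rw [hfe, hce]; exact hcd
    · intro h
      exact (hinv _).mpr ⟨field, nc, hfld, h, rfl⟩
  -- partial-match tests agree
  have hany : (seen.any (fun sp =>
        match PySem.Str.splitMax? sp ":" 1 with
        | some [sf, sc] =>
            sf == field && (PySem.Str.isIn nc sc || PySem.Str.isIn sc nc) && decide (3 < PySem.Str.len nc)
        | _ => false))
      = (d.getD field []).any (fun old => (PySem.Str.isIn nc old || PySem.Str.isIn old nc) && decide (3 < PySem.Str.len nc)) := by
    rw [Bool.eq_iff_iff, List.any_eq_true, List.any_eq_true]
    constructor
    · rintro ⟨sp, hsp, hpred⟩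
      obtain ⟨f, c, hfc, hcd, rfl⟩ := (hinv sp).mp hsp
      rw [pv_splitkey f c hfc] at hpred
      simp only [Bool.and_eq_true, beq_iff_eq] at hpred
      obtain ⟨⟨hfe, hsub⟩, hlen⟩ := hpred
      refine ⟨c, ?_, ?_⟩
      · rw [← hfe]; exact hcd
      · simp only [Bool.and_eq_true]; exact ⟨hsub, hlen⟩
    · rintro ⟨old, hold, hpred⟩
      refine ⟨field ++ ":" ++ old, (hinv _).mpr ⟨field, old, hfld, hold, rfl⟩, ?_⟩
      rw [pv_splitkey field old hfld]
      simp only [Bool.and_eq_true, beq_iff_eq] at hpred ⊢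
      exact ⟨⟨trivial, hpred.1⟩, hpred.2⟩
  rw [hmem, hany]
  by_cases hct : ((d.getD field []).contains nc) = true
  case pos => rw [if_pos hct, if_pos hct]; exact ⟨by simp, hinv⟩
  rw [if_neg hct, if_neg hct]
  by_cases hd : ((d.getD field []).any (fun old => (PySem.Str.isIn nc old || PySem.Str.isIn old nc) && decide (3 < PySem.Str.len nc))) = true
  case pos => rw [if_pos hd, if_pos hd]; exact ⟨by simp, hinv⟩
  rw [if_neg hd, if_neg hd]
  refine ⟨rfl, ?_⟩
  have hknot : (field ++ ":" ++ nc) ∉ seen := fun hk =>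
    hct (by rw [← hmem]; exact (PySem.Set.contains_iff _ _).mpr hk)
  have hnewmem : ∀ f : String, ((d.insert field (d.getD field [] ++ [nc])).getD f []) =
      if f = field then d.getD field [] ++ [nc] else d.getD f [] :=
    fun f => PySem.Dict.getD_insert d field f (d.getD field [] ++ [nc]) []
  intro sp
  rw [PySem.Set.add_of_not_mem hknot, List.mem_append, List.mem_singleton]
  constructor
  · rintro (hsp | rfl)
    · obtain ⟨f, c, hfc, hcd, rfl⟩ := (hinv _).mp hsp
      refine ⟨f, c, hfc, ?_, rfl⟩
      rw [hnewmem f]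
      by_cases hfe : f = field
      · rw [if_pos hfe, List.mem_append]; left; rw [← hfe]; exact hcd
      · rw [if_neg hfe]; exact hcd
    · exact ⟨field, nc, hfld,
        by rw [hnewmem field, if_pos rfl, List.mem_append, List.mem_singleton]; right; rfl, rfl⟩
  · rintro ⟨f, c, hfc, hcd, rfl⟩
    rw [hnewmem f] at hcd
    by_cases hfe : f = field
    · rw [if_pos hfe] at hcd
      rcases List.mem_append.mp hcd with hcb | hcn
      · left; exact (hinv _).mpr ⟨f, c, hfc, by rw [← hfe] at hcb; exact hcb, rfl⟩
      · right; rw [List.mem_singleton] at hcn; rw [hfe, hcn]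
    · rw [if_neg hfe] at hcd
      left; exact (hinv _).mpr ⟨f, c, hfc, hcd, rfl⟩

lemma pv_loop (logs : List (List (String × String))) :
    ∀ (seen : PySem.Set String) (d : PySem.Dict String (List String)) (n : Int),
      (∀ log ∈ logs, ':' ∉ (pvField ((PySem.Dict.ofList log).getD "context" "")).toList) →
      pvInv seen d →
      (logs.foldl pvStepA (seen, n)).2 = (logs.foldl pvStepRef (d, n)).2 := by
  induction logs with
  | nil => intro seen d n _ _; rfl
  | cons log rest ih =>
    intro seen d n hpre hinv
    obtain ⟨h2, hinv'⟩ := pv_step_eq seen d n log (hpre log (by simp)) hinv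
    simp only [List.foldl_cons]
    rw [← Prod.mk.eta (p := pvStepA (seen, n) log), ← Prod.mk.eta (p := pvStepRef (d, n) log), h2]
    exact ih (pvStepA (seen, n) log).1 (pvStepRef (d, n) log).1 (pvStepRef (d, n) log).2
      (fun l hl => hpre l (by simp [hl])) hinv'

-- pvFieldFlagCount's loop from an arbitrary start is pvG
lemma pv_ffc_go (seq : List String) :
    ∀ (acc : List String) (n : Int),
      (seq.foldl (fun (st : List String × Int) nc =>
          if st.1.contains nc ||
             st.1.any (fun old => (PySem.Str.isIn nc old || PySem.Str.isIn old nc) && decide (3 < PySem.Str.len nc))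
          then st else (st.1 ++ [nc], st.2 + 1)) (acc, n)).2 = n + pvG seq acc := by
  induction seq with
  | nil => intro acc n; simp [pvG_nil]
  | cons nc rest ih =>
    intro acc n
    simp only [List.foldl_cons, pvG_cons]
    by_cases h : (acc.contains nc ||
        acc.any (fun old => (PySem.Str.isIn nc old || PySem.Str.isIn old nc) && decide (3 < PySem.Str.len nc))) = true
    · rw [if_pos h, if_pos h, ih]
    · rw [if_neg h, if_neg h, ih]; ring

lemma pv_ffc_eq (seq : List String) : pvFieldFlagCount seq = pvG seq [] := by
  unfold pvFieldFlagCount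
  rw [pv_ffc_go]
  simp

-- one step of the grouping loop, written with the named features (definitional: modify = insert of the appended bucket)
lemma pv_groupstep_eq (g : PySem.Dict String (List String)) (log : List (String × String)) :
    pvGroupStep g log = if pvQual log then g.modify (pvFld log) [] (· ++ [pvNC log]) else g := rfl

-- the grouping pass is the modify-fold over the qualifying (field, nc) pairs
lemma pv_groups_eq (logs : List (List (String × String))) :
    logs.foldl pvGroupStep PySem.Dict.empty
      = (pvPairs logs).foldl (fun g p => g.modify p.1 [] (· ++ [p.2])) PySem.Dict.empty := by
  have h1 : logs.foldl pvGroupStep PySem.Dict.empty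
      = logs.foldl (fun g log => if pvQual log then PySem.Dict.modify g (pvFld log) [] (· ++ [pvNC log]) else g) PySem.Dict.empty :=
    PySem.List.foldl_congr_mem logs pvGroupStep
      (fun g log => if pvQual log then PySem.Dict.modify g (pvFld log) [] (· ++ [pvNC log]) else g)
      PySem.Dict.empty (fun g log _ => pv_groupstep_eq g log)
  rw [h1, PySem.List.foldl_if_eq_foldl_filter pvQual (fun g log => PySem.Dict.modify g (pvFld log) [] (· ++ [pvNC log]))]
  rw [pvPairs, List.foldl_map]

lemma pv_groups_getD (logs : List (List (String × String))) (f : String) :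
    (logs.foldl pvGroupStep PySem.Dict.empty).getD f [] = pvProj f logs := by
  rw [pv_groups_eq, PySem.Dict.getD_foldl_modify_append]
  simp [pvProj, PySem.Dict.getD_empty]

lemma pv_groups_keys (logs : List (List (String × String))) :
    (logs.foldl pvGroupStep PySem.Dict.empty).keys = PySem.Set.ofList ((pvPairs logs).map (fun p => p.1)) := by
  rw [pv_groups_eq,
    PySem.Dict.keys_foldl_modify_key (pvPairs logs) (fun p => p.1) [] (fun _ p => (· ++ [p.2])) PySem.Dict.empty]
  rw [PySem.Dict.keys_empty, PySem.Set.ofList_eq_foldl]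
  rfl

-- one step of pvProj
lemma pv_proj_cons_nq (f : String) (log : List (String × String)) (rest : List (List (String × String)))
    (h : pvQual log = false) : pvProj f (log :: rest) = pvProj f rest := by
  simp [pvProj, pvPairs, h]

lemma pv_proj_cons_q (f : String) (log : List (String × String)) (rest : List (List (String × String)))
    (h : pvQual log = true) :
    pvProj f (log :: rest) = if pvFld log = f then pvNC log :: pvProj f rest else pvProj f rest := by
  by_cases hf : pvFld log = f
  · simp [pvProj, pvPairs, h, hf]
  · simp [pvProj, pvPairs, h, hf]

-- a Nodup sum where exactly the f0 entry grows by one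
lemma pv_sum_shift (F : List String) (f0 : String) (g g' : String → Int)
    (hn : F.Nodup) (h0 : f0 ∈ F) (hoff : ∀ f ∈ F, f ≠ f0 → g f = g' f) (hat : g f0 = g' f0 + 1) :
    (F.map g).sum = (F.map g').sum + 1 := by
  induction F with
  | nil => cases h0
  | cons a t ih =>
    rcases List.mem_cons.mp h0 with rfl | h0t
    · have : ∀ f ∈ t, g f = g' f := fun f hf =>
        hoff f (List.mem_cons_of_mem _ hf) (fun e => (List.nodup_cons.mp hn).1 (e ▸ hf))
      simp only [List.map_cons, List.sum_cons, hat, List.map_congr_left this]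
      ring
    · have ha : g a = g' a := hoff a List.mem_cons_self (fun e => (List.nodup_cons.mp hn).1 (e ▸ h0t))
      simp only [List.map_cons, List.sum_cons, ha,
        ih (List.nodup_cons.mp hn).2 h0t (fun f hf => hoff f (List.mem_cons_of_mem _ hf))]
      ring

-- MAIN: the reference single pass equals the per-field greedy sum
lemma pv_main (logs : List (List (String × String))) :
    ∀ (d : PySem.Dict String (List String)) (n : Int) (F : List String),
      F.Nodup → (∀ log ∈ logs, pvQual log = true → pvFld log ∈ F) →
      (logs.foldl pvStepRef (d, n)).2 = n + (F.map (fun f => pvG (pvProj f logs) (d.getD f []))).sum := by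
  induction logs with
  | nil =>
    intro d n F _ _
    simp [pvProj, pvPairs, pvG_nil]
  | cons log rest ih =>
    intro d n F hnd hmem
    by_cases hq : pvQual log = true
    case neg =>
      have hq' : pvQual log = false := by revert hq; cases pvQual log <;> simp
      have hstep : pvStepRef (d, n) log = (d, n) := by rw [pvStepRef_unfold, if_neg hq]
      simp only [List.foldl_cons, hstep]
      rw [ih d n F hnd (fun l hl h => hmem l (List.mem_cons_of_mem _ hl) h)]
      congr 1
      exact congrArg List.sum (List.map_congr_left (fun f _ => by rw [pv_proj_cons_nq f log rest hq']))
    have hf0F : pvFld log ∈ F := hmem log List.mem_cons_self hq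
    by_cases hdup : ((d.getD (pvFld log) []).contains (pvNC log) ||
        (d.getD (pvFld log) []).any (fun old =>
          (PySem.Str.isIn (pvNC log) old || PySem.Str.isIn old (pvNC log)) && decide (3 < PySem.Str.len (pvNC log)))) = true
    · -- duplicate: state unchanged, the head of proj (pvFld log) is swallowed by pvG
      have hstep : pvStepRef (d, n) log = (d, n) := by
        rw [pvStepRef_unfold, if_pos hq]
        rcases Bool.or_eq_true_iff.mp hdup with h | h
        · rw [if_pos h]
        · by_cases hc : (d.getD (pvFld log) []).contains (pvNC log) = true
          · rw [if_pos hc]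
          · rw [if_neg hc, if_pos h]
      simp only [List.foldl_cons, hstep]
      rw [ih d n F hnd (fun l hl h => hmem l (List.mem_cons_of_mem _ hl) h)]
      congr 1
      refine congrArg List.sum (List.map_congr_left (fun f _ => ?_))
      rw [pv_proj_cons_q f log rest hq]
      by_cases hf : pvFld log = f
      · rw [hf] at hdup
        rw [if_pos hf, pvG_cons, if_pos hdup]
      · rw [if_neg hf]
    · -- new content: the bucket grows and the count grows by one
      have h1 : ¬ ((d.getD (pvFld log) []).contains (pvNC log) = true) :=
        fun h => hdup (Bool.or_eq_true_iff.mpr (Or.inl h))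
      have h2 : ¬ ((d.getD (pvFld log) []).any (fun old =>
          (PySem.Str.isIn (pvNC log) old || PySem.Str.isIn old (pvNC log)) && decide (3 < PySem.Str.len (pvNC log))) = true) :=
        fun h => hdup (Bool.or_eq_true_iff.mpr (Or.inr h))
      have hstep : pvStepRef (d, n) log
          = (d.insert (pvFld log) (d.getD (pvFld log) [] ++ [pvNC log]), n + 1) := by
        rw [pvStepRef_unfold, if_pos hq, if_neg h1, if_neg h2]
      simp only [List.foldl_cons, hstep]
      rw [ih (d.insert (pvFld log) (d.getD (pvFld log) [] ++ [pvNC log])) (n + 1) F hnd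
        (fun l hl h => hmem l (List.mem_cons_of_mem _ hl) h)]
      have hsum : (F.map (fun f => pvG (pvProj f (log :: rest)) (d.getD f []))).sum
          = (F.map (fun f => pvG (pvProj f rest)
              ((d.insert (pvFld log) (d.getD (pvFld log) [] ++ [pvNC log])).getD f []))).sum + 1 := by
        refine pv_sum_shift F (pvFld log) _ _ hnd hf0F (fun f hf hne => ?_) ?_
        · rw [pv_proj_cons_q f log rest hq, if_neg (fun e => hne e.symm),
            PySem.Dict.getD_insert, if_neg hne]
        · rw [pv_proj_cons_q (pvFld log) log rest hq, if_pos rfl, pvG_cons,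
            if_neg hdup, PySem.Dict.getD_insert, if_pos rfl]
          ring
      rw [hsum]; ring

-- ===== VERDICT (by name: the statement is the Claim_ definition above) =====
theorem count_unique_detected_flags_spec : Claim_equal_count_unique_detected_flags := by
  intro logs _ hpre
  unfold Spec_count_unique_detected_flags count_unique_detected_flags count_unique_detected_flags_alt
  show (logs.foldl pvStepA (PySem.Set.empty, 0)).2
      = ((logs.foldl pvGroupStep PySem.Dict.empty).values.map pvFieldFlagCount).sum
  have hkeys := pv_groups_keys logs
  have hnd : (logs.foldl pvGroupStep PySem.Dict.empty).keys.Nodup := by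
    rw [hkeys]; exact PySem.Set.nodup_ofList _
  have hmemF : ∀ log ∈ logs, pvQual log = true →
      pvFld log ∈ (logs.foldl pvGroupStep PySem.Dict.empty).keys := by
    intro log hl h
    rw [hkeys, PySem.Set.mem_ofList]
    exact List.mem_map.mpr ⟨(pvFld log, pvNC log),
      List.mem_map.mpr ⟨log, List.mem_filter.mpr ⟨hl, h⟩, rfl⟩, rfl⟩
  have hA : (logs.foldl pvStepA (PySem.Set.empty, 0)).2
      = (logs.foldl pvStepRef (PySem.Dict.empty, 0)).2 :=
    pv_loop logs PySem.Set.empty PySem.Dict.empty 0 hpre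
      (by intro sp; simp [PySem.Set.empty, PySem.Dict.getD_empty])
  rw [hA, pv_main logs PySem.Dict.empty 0 _ hnd hmemF]
  rw [PySem.Dict.values_eq_map_keys _ hnd [], List.map_map, zero_add]
  refine congrArg List.sum (List.map_congr_left (fun f _ => ?_))
  simp only [Function.comp]
  rw [pv_ffc_eq, pv_groups_getD, PySem.Dict.getD_empty]
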